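-- pv_equiv track=rewrite | github.com/morvvy/hw_tasks | task_1/exercise_8/exercise_8.py | count_unique_words
-- ===== SOURCE A (Python) =====
-- import string
--
-- def count_unique_words(text: str) -> int:
--     text = text.lower()
--     text = text.translate(str.maketrans('', '', string.punctuation))
--     words = text.split()
--
--     unique_words = set()
--
--     unique_words_count = 0
--
--     for word in words:
--         if word not in unique_words:
--             unique_words_count += 1
--             unique_words.add(word)
--
--     return unique_words_count
-- ===== SOURCE B (Python) =====
-- import string
--
-- def _distinct(words):
--     if not words:
--         return 0
--     w = words[0]
--     return 1 + _distinct([x for x in words[1:] if x != w])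
--
-- def count_unique_words(text: str) -> int:
--     text = text.lower()
--     cleaned = ''.join(c for c in text if c not in string.punctuation)
--     return _distinct(cleaned.split())
-- ===== Notes on version B (the rewrite author's own statement) =====
-- stated objective: alternative
-- what changed: Replaces A's set-membership accumulator loop with a recursive remove-duplicates decomposition: count the first word and recurse on the tail with all its copies filtered out.
import Mathlib
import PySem

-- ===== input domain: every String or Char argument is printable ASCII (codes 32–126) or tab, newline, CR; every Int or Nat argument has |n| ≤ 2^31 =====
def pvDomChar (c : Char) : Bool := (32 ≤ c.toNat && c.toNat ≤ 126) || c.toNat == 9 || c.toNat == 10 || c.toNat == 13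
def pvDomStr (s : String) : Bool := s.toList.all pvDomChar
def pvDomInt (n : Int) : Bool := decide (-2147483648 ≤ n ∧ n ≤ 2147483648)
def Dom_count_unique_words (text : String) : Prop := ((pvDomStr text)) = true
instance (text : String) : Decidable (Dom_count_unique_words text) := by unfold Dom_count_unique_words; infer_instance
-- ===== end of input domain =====

-- B replaces A's set-membership accumulator loop with a recursive remove-duplicates decomposition (count head, recurse on tail minus its copies); alternative, same results.


-- string.punctuation
def pvPunct : List Char := "!\"#$%&'()*+,-./:;<=>?@[\\]^_`{|}~".toList

-- shared preprocessing: both Pythons lowercase the text, drop every string.punctuation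
-- character (A via translate with a deletion table, B via a character comprehension —
-- both are exactly this filter) and split on whitespace
def pvWords (text : String) : List String :=
  PySem.Str.split₀ (String.ofList ((PySem.Str.lower text).toList.filter (fun c => !pvPunct.contains c)))

-- ===== PORT A =====
def count_unique_words (text : String) : Int :=
  ((pvWords text).foldl
    (fun (st : PySem.Set String × Int) w =>
      if PySem.Set.contains st.1 w then st else (PySem.Set.add st.1 w, st.2 + 1))
    (PySem.Set.empty, 0)).2

-- ===== PORT B =====
-- Source B's _distinct: 0 on the empty list, else 1 plus the count of the tail with
-- every copy of the head filtered out
def pvDistinct : List String → Int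
  | [] => 0
  | w :: t => 1 + pvDistinct (t.filter (fun x => x ≠ w))
termination_by l => l.length
decreasing_by
  calc (List.filter _ t.attach).unattach.length ≤ t.attach.unattach.length := by
        rw [List.length_unattach, List.length_unattach]
        exact List.length_filter_le _ _
    _ < (w :: t).length := by simp

def count_unique_words_alt (text : String) : Int :=
  pvDistinct (pvWords text)

-- ===== PRECONDITION & SPEC =====
def Spec_count_unique_words (text : String) (out : Int) : Prop := out = count_unique_words_alt text
instance (text : String) (out : Int) : Decidable (Spec_count_unique_words text out) := by unfold Spec_count_unique_words; infer_instance

-- ===== CLAIM (what is proved, stated in full; the proofs are below) =====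
def Claim_equal_count_unique_words : Prop := ∀ (text : String), Dom_count_unique_words text → Spec_count_unique_words text (count_unique_words text)

-- ===== LEMMAS AND PROOFS =====

-- A's loop starting from set s and counter c: the counter gains the number of new elements.
theorem pv_foldA (l : List String) (s : PySem.Set String) (c : Int) :
    (l.foldl
      (fun (st : PySem.Set String × Int) w =>
        if PySem.Set.contains st.1 w then st else (PySem.Set.add st.1 w, st.2 + 1))
      (s, c)) = (PySem.Set.update s l, c + ((PySem.Set.update s l).length : Int) - s.length) := by
  induction l generalizing s c with
  | nil => simp [PySem.Set.update]
  | cons w t ih =>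
    by_cases h : w ∈ s
    · have hc : PySem.Set.contains s w = true := by
        simp [PySem.Set.contains_eq_listContains, h]
      have ha : PySem.Set.add s w = s := PySem.Set.add_of_mem h
      simp only [List.foldl_cons]
      rw [if_pos hc]
      simp only [PySem.Set.update_cons, ha, ih]
    · have hc : ¬ PySem.Set.contains s w = true := by
        simp [PySem.Set.contains_eq_listContains, h]
      have ha : PySem.Set.add s w = s ++ [w] := PySem.Set.add_of_not_mem h
      simp only [List.foldl_cons]
      rw [if_neg hc]
      simp only [PySem.Set.update_cons, ih, ha]
      refine Prod.ext rfl ?_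
      simp only [List.length_append, List.length_cons, List.length_nil]
      push_cast; ring

-- the common value of both programs: the number of distinct words
theorem pv_A_card (text : String) :
    count_unique_words text = ((pvWords text).toFinset.card : Int) := by
  unfold count_unique_words
  rw [pv_foldA]
  have h1 : PySem.Set.update PySem.Set.empty (pvWords text) = PySem.Set.ofList (pvWords text) :=
    PySem.Set.update_nil_left _
  have hcard : ((PySem.Set.ofList (pvWords text)).length : Int) = ((pvWords text).toFinset.card : Int) := by
    have h2 : (PySem.Set.ofList (pvWords text)).toFinset = (pvWords text).toFinset := by
      ext a; simp [PySem.Set.mem_ofList]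
    have h3 : (PySem.Set.ofList (pvWords text)).toFinset.card = (PySem.Set.ofList (pvWords text)).length :=
      List.toFinset_card_of_nodup (PySem.Set.nodup_ofList _)
    rw [← h3, h2]
  rw [h1, hcard, show List.length (PySem.Set.empty : PySem.Set String) = 0 from rfl]
  push_cast
  ring

theorem pvDistinct_cons (w : String) (t : List String) :
    pvDistinct (w :: t) = 1 + pvDistinct (t.filter (fun x => x ≠ w)) := by
  simp [pvDistinct]

-- B's recursion also computes the number of distinct elements
theorem pv_distinct_card (l : List String) : pvDistinct l = (l.toFinset.card : Int) := by
  have key : ∀ n (l : List String), l.length ≤ n → pvDistinct l = (l.toFinset.card : Int) := by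
    intro n
    induction n with
    | zero =>
      intro l hl
      rw [List.length_eq_zero_iff.mp (Nat.le_zero.mp hl)]
      simp [pvDistinct]
    | succ n ih =>
      intro l hl
      match l with
      | [] => simp [pvDistinct]
      | w :: t =>
        have hlen : (t.filter (fun x => x ≠ w)).length ≤ n := by
          have := List.length_filter_le (fun x => x ≠ w) t
          simp only [List.length_cons, Nat.succ_le_succ_iff] at hl
          omega
        rw [pvDistinct_cons, ih _ hlen]
        have hf : (t.filter (fun x => x ≠ w)).toFinset = t.toFinset.erase w := by
          ext a
          simp [Finset.mem_erase, and_comm]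
        have hcard : (w :: t).toFinset.card = (t.toFinset.erase w).card + 1 := by
          rw [List.toFinset_cons]
          rw [← Finset.insert_erase (Finset.mem_insert_self w t.toFinset)]
          rw [Finset.card_insert_of_notMem (Finset.notMem_erase _ _)]
          rw [Finset.erase_insert_eq_erase]
        rw [hf, hcard]
        push_cast; ring
  exact key l.length l le_rfl

theorem pv_B_card (text : String) :
    count_unique_words_alt text = ((pvWords text).toFinset.card : Int) := by
  unfold count_unique_words_alt
  exact pv_distinct_card _

-- ===== VERDICT (by name: the statement is the Claim_ definition above) =====
theorem count_unique_words_spec : Claim_equal_count_unique_words := by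
  intro text _
  unfold Spec_count_unique_words
  rw [pv_A_card, pv_B_card]
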